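-- pv_equiv track=rewrite | github.com/Sherwin-xjtu/PEcnv | PElibrary/segmentation/__init__.py | EWMA_SEG
-- ===== SOURCE A (Python) =====
-- def EWMA_SEG(breakpointSelects):
--     csegs = []
--     start = breakpointSelects[0]
--     itm = 1
--     edgeSize = 2
--     for i in range(len(breakpointSelects)):
--         if i + 1 < len(breakpointSelects):
--             if itm == 1:
--                 start = breakpointSelects[i]
--             itm += 1
--             if breakpointSelects[i + 1] - breakpointSelects[i] < edgeSize:  #20 best
--                 if i + 1 == len(breakpointSelects) - 1:
--                     if start - edgeSize > 0:
--                         csegs.append([start - edgeSize, breakpointSelects[i + 1] + edgeSize])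
--                     else:
--                         csegs.append([start, breakpointSelects[i + 1]])
--             elif breakpointSelects[i + 1] - breakpointSelects[i] > edgeSize:
--                 end = breakpointSelects[i]
--                 if start - edgeSize < 0:
--                     csegs.append([start, end + edgeSize])
--                 else:
--                     csegs.append([start - edgeSize, end + edgeSize])
--                 itm = 1
--     return csegs
-- ===== SOURCE B (Python) =====
-- def EWMA_SEG(breakpointSelects):
--     n = len(breakpointSelects)
--     cuts = [i for i in range(n - 1) if breakpointSelects[i + 1] - breakpointSelects[i] > 2]
--     segs = []
--     prev = 0
--     for c in cuts:
--         s = breakpointSelects[prev]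
--         segs.append([s - 2, breakpointSelects[c] + 2] if s >= 2 else [s, breakpointSelects[c] + 2])
--         prev = c + 1
--     if n - prev >= 2 and breakpointSelects[n - 1] - breakpointSelects[n - 2] < 2:
--         s = breakpointSelects[prev]
--         segs.append([s - 2, breakpointSelects[n - 1] + 2] if s > 2 else [s, breakpointSelects[n - 1]])
--     return segs
-- ===== Notes on version B (the rewrite author's own statement) =====
-- stated objective: alternative
-- what changed: A's single index loop with itm/start counter state is replaced by a two-phase decomposition: first compute the list of cut indices (gap > 2), then emit one segment per cut and handle the final group with a separate post-loop check.
import Mathlib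
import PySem

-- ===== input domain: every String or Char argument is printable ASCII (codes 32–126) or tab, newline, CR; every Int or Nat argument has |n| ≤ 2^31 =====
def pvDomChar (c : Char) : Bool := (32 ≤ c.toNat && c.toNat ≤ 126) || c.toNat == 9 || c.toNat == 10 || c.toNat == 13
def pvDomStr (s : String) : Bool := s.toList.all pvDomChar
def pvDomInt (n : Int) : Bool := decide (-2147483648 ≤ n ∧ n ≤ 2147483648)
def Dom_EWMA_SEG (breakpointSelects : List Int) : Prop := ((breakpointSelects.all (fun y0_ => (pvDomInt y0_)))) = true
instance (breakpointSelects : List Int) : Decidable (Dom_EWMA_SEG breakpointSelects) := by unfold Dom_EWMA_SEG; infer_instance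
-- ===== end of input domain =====

-- B replaces A's single index loop with counter state (itm/start) by a two-phase decomposition:
-- first the list of cut indices (gap > 2), then one segment per cut plus a separately handled final
-- group; same return value on every non-empty input (objective: alternative decomposition).

-- ===== PORT A =====
-- loop body of A's `for i in range(len(breakpointSelects))`; state = (csegs, start, itm)
def aStep (bps : List Int) (st : List (List Int) × Int × Int) (i : Int) : List (List Int) × Int × Int :=
  let csegs := st.1
  let start := st.2.1
  let itm := st.2.2
  if i + 1 < (bps.length : Int) then
    let start := if itm = 1 then PySem.List.pyGetD bps i 0 else start
    let itm := itm + 1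
    if PySem.List.pyGetD bps (i + 1) 0 - PySem.List.pyGetD bps i 0 < 2 then
      if i + 1 = (bps.length : Int) - 1 then
        if start - 2 > 0 then
          (csegs ++ [[start - 2, PySem.List.pyGetD bps (i + 1) 0 + 2]], start, itm)
        else
          (csegs ++ [[start, PySem.List.pyGetD bps (i + 1) 0]], start, itm)
      else (csegs, start, itm)
    else if PySem.List.pyGetD bps (i + 1) 0 - PySem.List.pyGetD bps i 0 > 2 then
      let e := PySem.List.pyGetD bps i 0
      if start - 2 < 0 then
        (csegs ++ [[start, e + 2]], start, 1)
      else
        (csegs ++ [[start - 2, e + 2]], start, 1)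
    else (csegs, start, itm)
  else (csegs, start, itm)

-- the initial first-element subscript is ported with pyGetD; Pre_ excludes the empty list, where Python raises IndexError
def EWMA_SEG (breakpointSelects : List Int) : List (List Int) :=
  ((PySem.List.pyRange 0 (breakpointSelects.length : Int) 1).foldl (aStep breakpointSelects)
      ([], PySem.List.pyGetD breakpointSelects 0 0, 1)).1

-- ===== PORT B =====
-- loop body of B's `for c in cuts:`; state = (segs, prev)
def bStep (bps : List Int) (st : List (List Int) × Int) (c : Int) : List (List Int) × Int :=
  let s := PySem.List.pyGetD bps st.2 0
  (st.1 ++ [if s ≥ 2 then [s - 2, PySem.List.pyGetD bps c 0 + 2] else [s, PySem.List.pyGetD bps c 0 + 2]], c + 1)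

-- B's trailing `if n - prev >= 2 and ...` final-group append
def bFin (bps : List Int) (st : List (List Int) × Int) : List (List Int) :=
  let n : Int := bps.length
  if 2 ≤ n - st.2 ∧ PySem.List.pyGetD bps (n - 1) 0 - PySem.List.pyGetD bps (n - 2) 0 < 2 then
    let s := PySem.List.pyGetD bps st.2 0
    st.1 ++ [if s > 2 then [s - 2, PySem.List.pyGetD bps (n - 1) 0 + 2] else [s, PySem.List.pyGetD bps (n - 1) 0]]
  else st.1

def EWMA_SEG_alt (breakpointSelects : List Int) : List (List Int) :=
  bFin breakpointSelects
    (((PySem.List.pyRange 0 ((breakpointSelects.length : Int) - 1) 1).filter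
        (fun i => decide (PySem.List.pyGetD breakpointSelects (i + 1) 0 - PySem.List.pyGetD breakpointSelects i 0 > 2))).foldl
      (bStep breakpointSelects) ([], 0))

-- ===== PRECONDITION & SPEC =====
-- Pre_ excludes only the empty list, on which A raises IndexError at its initial first-element access.
def Pre_EWMA_SEG (breakpointSelects : List Int) : Prop := breakpointSelects ≠ []
instance (breakpointSelects : List Int) : Decidable (Pre_EWMA_SEG breakpointSelects) := by unfold Pre_EWMA_SEG; infer_instance
def pvWitness_EWMA_SEG : List Int := [1, 2, 3]

def Spec_EWMA_SEG (breakpointSelects : List Int) (out : List (List Int)) : Prop := out = EWMA_SEG_alt breakpointSelects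
instance (breakpointSelects : List Int) (out : List (List Int)) : Decidable (Spec_EWMA_SEG breakpointSelects out) := by unfold Spec_EWMA_SEG; infer_instance

-- ===== CLAIM (what is proved, stated in full; the proofs are below) =====
def Claim_equal_EWMA_SEG : Prop := ∀ (breakpointSelects : List Int), Dom_EWMA_SEG breakpointSelects → Pre_EWMA_SEG breakpointSelects → Spec_EWMA_SEG breakpointSelects (EWMA_SEG breakpointSelects)

-- ===== LEMMAS AND PROOFS =====

-- common recursive characterisation of both ports: segments of the suffix, `s` = start of the current group
def specGo (s : Int) : List Int → List (List Int)
  | x :: y :: rest =>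
      if rest.isEmpty then
        (if y - x < 2 then (if s - 2 > 0 then [[s - 2, y + 2]] else [[s, y]])
         else if y - x > 2 then (if s - 2 < 0 then [[s, x + 2]] else [[s - 2, x + 2]])
         else [])
      else
        (if y - x > 2 then
          (if s - 2 < 0 then [s, x + 2] else [s - 2, x + 2]) :: specGo y (y :: rest)
         else specGo s (y :: rest))
  | _ => []

lemma specGo_short (s : Int) (l : List Int) (h : l.length ≤ 1) : specGo s l = [] := by
  match l, h with
  | [], _ => rfl
  | [_], _ => rfl

lemma bFin_apply (bps : List Int) (segs : List (List Int)) (p : Int) :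
    bFin bps (segs, p) =
      if 2 ≤ (bps.length : Int) - p ∧
          PySem.List.pyGetD bps ((bps.length : Int) - 1) 0 - PySem.List.pyGetD bps ((bps.length : Int) - 2) 0 < 2 then
        segs ++ [if PySem.List.pyGetD bps p 0 > 2 then
                    [PySem.List.pyGetD bps p 0 - 2, PySem.List.pyGetD bps ((bps.length : Int) - 1) 0 + 2]
                  else [PySem.List.pyGetD bps p 0, PySem.List.pyGetD bps ((bps.length : Int) - 1) 0]]
      else segs := rfl

lemma aLoop (bps : List Int) :
    ∀ (m k : Nat) (segs : List (List Int)) (s itm : Int), bps.length - k = m → 1 ≤ itm →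
      ((PySem.List.pyRange (k : Int) (bps.length : Int) 1).foldl (aStep bps) (segs, s, itm)).1
        = segs ++ specGo (if itm = 1 then bps.getD k 0 else s) (bps.drop k) := by
  intro m
  induction m with
  | zero =>
    intro k segs s itm hm hitm
    have hk : bps.length ≤ k := by omega
    rw [PySem.List.pyRange_one_eq_nil (by exact_mod_cast hk)]
    simp [List.drop_eq_nil_of_le hk, specGo]
  | succ m ih =>
    intro k segs s itm hm hitm
    have hk : k < bps.length := by omega
    rw [PySem.List.pyRange_one_cons (by exact_mod_cast hk)]
    simp only [List.foldl_cons]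
    have hc : ((k : Int) + 1) = ((k + 1 : Nat) : Int) := by push_cast; ring
    by_cases hk1 : k + 1 < bps.length
    · simp only [aStep, hc, PySem.List.pyGetD_natCast]
      set s' := (if itm = 1 then bps.getD k 0 else s) with hs'
      rw [if_pos (show ((k + 1 : Nat) : Int) < (bps.length : Int) by exact_mod_cast hk1)]
      have hd : List.drop k bps = bps.getD k 0 :: List.drop (k + 1) bps := by
        rw [List.drop_eq_getElem_cons hk, List.getD_eq_getElem _ _ hk]
      have hd1 : List.drop (k + 1) bps = bps.getD (k + 1) 0 :: List.drop (k + 2) bps := by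
        rw [List.drop_eq_getElem_cons hk1, List.getD_eq_getElem _ _ hk1]
      by_cases hg1 : bps.getD (k + 1) 0 - bps.getD k 0 < 2
      · rw [if_pos hg1]
        by_cases hlast : k + 1 = bps.length - 1
        · have hlast' : ((k + 1 : Nat) : Int) = (bps.length : Int) - 1 := by omega
          rw [if_pos hlast']
          have h2 : List.drop (k + 2) bps = [] := List.drop_eq_nil_of_le (by omega)
          have hshort : specGo s' (List.drop (k + 1) bps) = [] :=
            specGo_short _ _ (by rw [List.length_drop]; omega)
          by_cases hs2 : s' - 2 > 0
          · rw [if_pos hs2, ih (k + 1) _ _ _ (by omega) (by omega), if_neg (by omega), hshort]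
            rw [hd, hd1, h2]
            simp only [specGo, List.isEmpty_nil]
            rw [if_pos trivial, if_pos hg1, if_pos hs2]
            simp
          · rw [if_neg hs2, ih (k + 1) _ _ _ (by omega) (by omega), if_neg (by omega), hshort]
            rw [hd, hd1, h2]
            simp only [specGo, List.isEmpty_nil]
            rw [if_pos trivial, if_pos hg1, if_neg hs2]
            simp
        · have hlast' : ¬ ((k + 1 : Nat) : Int) = (bps.length : Int) - 1 := by omega
          rw [if_neg hlast', ih (k + 1) _ _ _ (by omega) (by omega), if_neg (by omega)]
          have hne : (List.drop (k + 2) bps).isEmpty = false := by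
            rw [List.isEmpty_eq_false_iff, ← List.length_pos_iff, List.length_drop]; omega
          rw [hd, hd1]
          simp only [specGo, hne, Bool.false_eq_true, if_false]
          rw [if_neg (show ¬ bps.getD (k+1) 0 - bps.getD k 0 > 2 by omega), ← hd1]
      · rw [if_neg hg1]
        by_cases hg2 : bps.getD (k + 1) 0 - bps.getD k 0 > 2
        · rw [if_pos hg2]
          have hih := ih (k + 1) (segs ++ [if s' - 2 < 0 then [s', bps.getD k 0 + 2] else [s' - 2, bps.getD k 0 + 2]]) s' 1 (by omega) (by omega)
          rw [if_pos rfl] at hih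
          by_cases hlast : k + 2 ≥ bps.length
          · have h2 : List.drop (k + 2) bps = [] := List.drop_eq_nil_of_le (by omega)
            have hshort : specGo (bps.getD (k + 1) 0) (List.drop (k + 1) bps) = [] :=
              specGo_short _ _ (by rw [List.length_drop]; omega)
            rw [hd, hd1, h2]
            by_cases hs3 : s' - 2 < 0
            · rw [if_pos hs3]
              rw [if_pos hs3] at hih
              rw [hih, hshort]
              simp only [specGo, List.isEmpty_nil]
              rw [if_pos trivial, if_neg hg1, if_pos hg2, if_pos hs3]
              simp
            · rw [if_neg hs3]
              rw [if_neg hs3] at hih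
              rw [hih, hshort]
              simp only [specGo, List.isEmpty_nil]
              rw [if_pos trivial, if_neg hg1, if_pos hg2, if_neg hs3]
              simp
          · have hne : (List.drop (k + 2) bps).isEmpty = false := by
              rw [List.isEmpty_eq_false_iff, ← List.length_pos_iff, List.length_drop]; omega
            rw [hd, hd1]
            by_cases hs3 : s' - 2 < 0
            · rw [if_pos hs3]
              rw [if_pos hs3] at hih
              rw [hih]
              simp only [specGo, hne, Bool.false_eq_true, if_false, if_pos hg2, if_pos hs3, ← hd1]
              simp
            · rw [if_neg hs3]
              rw [if_neg hs3] at hih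
              rw [hih]
              simp only [specGo, hne, Bool.false_eq_true, if_false, if_pos hg2, if_neg hs3, ← hd1]
              simp
        · rw [if_neg hg2, ih (k + 1) _ _ _ (by omega) (by omega), if_neg (by omega)]
          by_cases hlast : k + 2 ≥ bps.length
          · have h2 : List.drop (k + 2) bps = [] := List.drop_eq_nil_of_le (by omega)
            have hshort : specGo s' (List.drop (k + 1) bps) = [] :=
              specGo_short _ _ (by rw [List.length_drop]; omega)
            rw [hshort, hd, hd1, h2]
            simp only [specGo, List.isEmpty_nil]
            rw [if_pos trivial, if_neg hg1, if_neg hg2]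
          · have hne : (List.drop (k + 2) bps).isEmpty = false := by
              rw [List.isEmpty_eq_false_iff, ← List.length_pos_iff, List.length_drop]; omega
            rw [hd, hd1]
            simp only [specGo, hne, Bool.false_eq_true, if_false, if_neg hg2, ← hd1]
    · have hk1' : ¬ ((k : Int)) + 1 < (bps.length : Int) := by exact_mod_cast hk1
      simp only [aStep, if_neg hk1']
      rw [hc, ih (k + 1) segs s itm (by omega) hitm]
      rw [specGo_short _ _ (by simp; omega), specGo_short _ _ (by simp; omega)]

lemma bLoop (bps : List Int) (hn : 2 ≤ bps.length) :
    ∀ (m k prev : Nat) (segs : List (List Int)), bps.length - 2 - k = m → k ≤ bps.length - 2 → prev ≤ k →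
      bFin bps
        (((PySem.List.pyRange (k : Int) ((bps.length : Int) - 1) 1).filter
            (fun i => decide (PySem.List.pyGetD bps (i + 1) 0 - PySem.List.pyGetD bps i 0 > 2))).foldl
          (bStep bps) (segs, (prev : Int)))
        = segs ++ specGo (bps.getD prev 0) (bps.drop k) := by
  intro m
  induction m with
  | zero =>
    intro k prev segs hm hk hprev
    have hk2 : k = bps.length - 2 := by omega
    have hck : ((bps.length : Int) - 1) = (k : Int) + 1 := by omega
    have hgk : PySem.List.pyGetD bps ((k : Int) + 1) 0 = bps.getD (k + 1) 0 := by
      rw [show ((k : Int) + 1) = ((k + 1 : Nat) : Int) by push_cast; ring, PySem.List.pyGetD_natCast]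
    have hgk0 : PySem.List.pyGetD bps ((k : Int)) 0 = bps.getD k 0 := by
      rw [PySem.List.pyGetD_natCast]
    have hgp : PySem.List.pyGetD bps ((prev : Int)) 0 = bps.getD prev 0 := by
      rw [PySem.List.pyGetD_natCast]
    have hd : List.drop k bps = bps.getD k 0 :: List.drop (k + 1) bps := by
      rw [List.drop_eq_getElem_cons (by omega), List.getD_eq_getElem _ _ (by omega)]
    have hd1 : List.drop (k + 1) bps = bps.getD (k + 1) 0 :: List.drop (k + 2) bps := by
      rw [List.drop_eq_getElem_cons (by omega), List.getD_eq_getElem _ _ (by omega)]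
    have h2 : List.drop (k + 2) bps = [] := List.drop_eq_nil_of_le (by omega)
    rw [hck, PySem.List.pyRange_one_singleton, List.filter_singleton]
    by_cases hg : bps.getD (k + 1) 0 - bps.getD k 0 > 2
    · rw [show (decide (PySem.List.pyGetD bps ((k : Int) + 1) 0 - PySem.List.pyGetD bps ((k : Int)) 0 > 2)) = true
            by rw [hgk, hgk0]; exact decide_eq_true hg, cond_true]
      simp only [List.foldl_cons, List.foldl_nil, bStep]
      rw [bFin_apply, if_neg (by intro h; omega)]
      rw [hgp, hgk0, hd, hd1, h2]
      simp only [specGo, List.isEmpty_nil]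
      rw [if_pos trivial, if_neg (show ¬(bps.getD (k + 1) 0 - bps.getD k 0 < 2) by omega), if_pos hg]
      by_cases hs : bps.getD prev 0 ≥ 2
      · rw [if_pos hs, if_neg (show ¬(bps.getD prev 0 - 2 < 0) by omega)]
      · rw [if_neg hs, if_pos (show bps.getD prev 0 - 2 < 0 by omega)]
    · rw [show (decide (PySem.List.pyGetD bps ((k : Int) + 1) 0 - PySem.List.pyGetD bps ((k : Int)) 0 > 2)) = false
            by rw [hgk, hgk0]; exact decide_eq_false hg, cond_false]
      rw [List.foldl_nil, bFin_apply]
      rw [show ((bps.length : Int) - 1) = ((k + 1 : Nat) : Int) by omega,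
          show ((bps.length : Int) - 2) = ((k : Nat) : Int) by omega,
          PySem.List.pyGetD_natCast, PySem.List.pyGetD_natCast, hgp]
      rw [hd, hd1, h2]
      simp only [specGo, List.isEmpty_nil]
      by_cases hg1 : bps.getD (k + 1) 0 - bps.getD k 0 < 2
      · rw [if_pos ⟨by omega, hg1⟩, if_pos trivial, if_pos hg1]
        by_cases hs : bps.getD prev 0 > 2
        · rw [if_pos hs, if_pos (show bps.getD prev 0 - 2 > 0 by omega)]
        · rw [if_neg hs, if_neg (show ¬(bps.getD prev 0 - 2 > 0) by omega)]
      · rw [if_neg (by intro h; exact hg1 h.2), if_pos trivial, if_neg hg1, if_neg hg]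
        simp
  | succ m ih =>
    intro k prev segs hm hk hprev
    have hkl : (k : Int) < (bps.length : Int) - 1 := by omega
    have hgk : PySem.List.pyGetD bps ((k : Int) + 1) 0 = bps.getD (k + 1) 0 := by
      rw [show ((k : Int) + 1) = ((k + 1 : Nat) : Int) by push_cast; ring, PySem.List.pyGetD_natCast]
    have hgk0 : PySem.List.pyGetD bps ((k : Int)) 0 = bps.getD k 0 := by
      rw [PySem.List.pyGetD_natCast]
    have hgp : PySem.List.pyGetD bps ((prev : Int)) 0 = bps.getD prev 0 := by
      rw [PySem.List.pyGetD_natCast]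
    have hd : List.drop k bps = bps.getD k 0 :: List.drop (k + 1) bps := by
      rw [List.drop_eq_getElem_cons (by omega), List.getD_eq_getElem _ _ (by omega)]
    have hd1 : List.drop (k + 1) bps = bps.getD (k + 1) 0 :: List.drop (k + 2) bps := by
      rw [List.drop_eq_getElem_cons (by omega), List.getD_eq_getElem _ _ (by omega)]
    have hne : (List.drop (k + 2) bps).isEmpty = false := by
      rw [List.isEmpty_eq_false_iff, ← List.length_pos_iff, List.length_drop]; omega
    rw [PySem.List.pyRange_one_cons hkl, List.filter_cons]
    by_cases hg : bps.getD (k + 1) 0 - bps.getD k 0 > 2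
    · rw [if_pos (show (decide (PySem.List.pyGetD bps ((k : Int) + 1) 0 - PySem.List.pyGetD bps ((k : Int)) 0 > 2)) = true
            by rw [hgk, hgk0]; exact decide_eq_true hg)]
      simp only [List.foldl_cons, bStep, hgp, hgk0]
      rw [show ((k : Int) + 1) = ((k + 1 : Nat) : Int) by push_cast; ring]
      rw [ih (k + 1) (k + 1) _ (by omega) (by omega) (by omega)]
      rw [hd, hd1]
      simp only [specGo, hne, Bool.false_eq_true, if_false]
      rw [if_pos hg, ← hd1]
      by_cases hs : bps.getD prev 0 ≥ 2
      · rw [if_pos hs, if_neg (show ¬(bps.getD prev 0 - 2 < 0) by omega)]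
        simp
      · rw [if_neg hs, if_pos (show bps.getD prev 0 - 2 < 0 by omega)]
        simp
    · rw [if_neg (show ¬ (decide (PySem.List.pyGetD bps ((k : Int) + 1) 0 - PySem.List.pyGetD bps ((k : Int)) 0 > 2)) = true
            by rw [hgk, hgk0, decide_eq_true_eq]; exact hg)]
      rw [show ((k : Int) + 1) = ((k + 1 : Nat) : Int) by push_cast; ring]
      rw [ih (k + 1) prev _ (by omega) (by omega) (by omega)]
      rw [hd, hd1]
      simp only [specGo, hne, Bool.false_eq_true, if_false]
      rw [if_neg hg, ← hd1]

lemma EWMA_SEG_eq_specGo (bps : List Int) : EWMA_SEG bps = specGo (bps.getD 0 0) bps := by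
  unfold EWMA_SEG
  have h := aLoop bps bps.length 0 [] (PySem.List.pyGetD bps 0 0) 1 (by omega) (by omega)
  rw [Nat.cast_zero] at h
  rw [h, if_pos rfl, List.drop_zero, List.nil_append]

lemma EWMA_SEG_alt_eq_specGo (bps : List Int) (hpre : bps ≠ []) :
    EWMA_SEG_alt bps = specGo (bps.getD 0 0) bps := by
  unfold EWMA_SEG_alt
  by_cases hn : 2 ≤ bps.length
  · have h := bLoop bps hn (bps.length - 2) 0 0 [] rfl (by omega) (by omega)
    rw [Nat.cast_zero] at h
    rw [h, List.drop_zero, List.nil_append]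
  · have h1 : bps.length = 1 := by
      cases bps with
      | nil => exact absurd rfl hpre
      | cons x xs => simp at hn ⊢; omega
    rw [PySem.List.pyRange_one_eq_nil (by omega), List.filter_nil, List.foldl_nil, bFin_apply,
        if_neg (by intro h; omega)]
    rw [specGo_short _ _ (by omega)]

-- ===== VERDICT (by name: the statement is the Claim_ definition above) =====
theorem EWMA_SEG_spec : Claim_equal_EWMA_SEG := by
  intro bps _ hpre
  unfold Spec_EWMA_SEG
  rw [EWMA_SEG_eq_specGo, EWMA_SEG_alt_eq_specGo bps hpre]
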